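-- pv_equiv track=rewrite | github.com/AnnMarieW/dash | dash/_pages.py | _parse_path_variables
-- ===== SOURCE A (Python) =====
-- def _parse_path_variables(pathname, path_template):
--     """
--     creates the dict of path variables passed to the layout
--     e.g. path_template= "/asset/<asset_id>"
--          if pathname provided by the browser is "/assets/a100"
--          returns **{"asset_id": "a100"}
--     """
--     path_segments = pathname.split("/")
--     template_segments = path_template.split("/")
--
--     if len(path_segments) != len(template_segments):
--         return None
--
--     path_vars = {}
--     for path_segment, template_segment in zip(path_segments, template_segments):
--         if template_segment.startswith("<"):
--             path_vars[template_segment[1:-1]] = path_segment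
--         elif template_segment != path_segment:
--             return None
--     return path_vars
-- ===== SOURCE B (Python) =====
-- def _parse_path_variables(pathname, path_template):
--     """Single streaming pass over both raw strings with two cursors:
--     no splitting into lists, no length pre-check; a segment-count mismatch
--     is discovered lazily when one string runs out of '/' before the other."""
--     path_vars = {}
--     i = j = 0
--     while True:
--         pe = pathname.find("/", i)
--         te = path_template.find("/", j)
--         pseg = pathname[i:] if pe == -1 else pathname[i:pe]
--         tseg = path_template[j:] if te == -1 else path_template[j:te]
--         if tseg.startswith("<"):
--             path_vars[tseg[1:-1]] = pseg
--         elif tseg != pseg: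
--             return None
--         if pe == -1 and te == -1:
--             return path_vars
--         if pe == -1 or te == -1:
--             return None
--         i, j = pe + 1, te + 1
-- ===== Notes on version B (the rewrite author's own statement) =====
-- stated objective: alternative
-- what changed: Replaces A's split-both-strings-into-segment-lists + length pre-check + zip loop by a single two-cursor streaming scan over the raw strings (str.find for the next '/' on each side, compare or capture that segment, advance both cursors), with a segment-count mismatch discovered lazily when one side runs out of '/' before the other.
import Mathlib
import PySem

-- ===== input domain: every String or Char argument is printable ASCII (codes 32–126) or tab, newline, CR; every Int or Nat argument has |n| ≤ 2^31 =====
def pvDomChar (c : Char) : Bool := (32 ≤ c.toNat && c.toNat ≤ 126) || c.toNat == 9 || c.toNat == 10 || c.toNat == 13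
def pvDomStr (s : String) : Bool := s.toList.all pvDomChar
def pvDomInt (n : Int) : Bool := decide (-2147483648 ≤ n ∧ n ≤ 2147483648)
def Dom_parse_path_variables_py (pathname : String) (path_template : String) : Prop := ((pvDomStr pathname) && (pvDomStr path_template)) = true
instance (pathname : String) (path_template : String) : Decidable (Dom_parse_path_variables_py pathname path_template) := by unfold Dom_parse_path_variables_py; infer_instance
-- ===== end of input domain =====

-- B replaces A's split-into-lists + length pre-check + zip loop by a single two-cursor streaming
-- scan over the raw strings (find the next '/' on each side, compare/capture that segment, advance
-- both cursors; a segment-count mismatch surfaces lazily when one side runs out of '/' before the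
-- other); objective: alternative (same O(n) algorithmic cost, no intermediate segment lists).

-- ===== PORT A =====
-- A's for-loop over zip(path_segments, template_segments) with the dict accumulator
def pvALoop : List (String × String) → PySem.Dict String String → Option (PySem.Dict String String)
  | [], d => some d
  | (p, t) :: rest, d =>
    if PySem.Str.startswith t "<" then
      pvALoop rest (d.insert (PySem.Str.slice t (some 1) (some (-1))) p)
    else if t ≠ p then none
    else pvALoop rest d

def parse_path_variables_py (pathname : String) (path_template : String) : Option (List (String × String)) :=
  let path_segments := (PySem.Str.split? pathname "/").getD []   -- sep "/" is non-empty: split? never fails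
  let template_segments := (PySem.Str.split? path_template "/").getD []
  if path_segments.length ≠ template_segments.length then none
  else (pvALoop (path_segments.zip template_segments) PySem.Dict.empty).map (·.items)

-- ===== PORT B =====
-- B's while-loop, one call per iteration, on the code-point lists of the two remaining suffixes:
-- "the slice from the cursor up to the next '/' (str.find)" is takeWhile (· ≠ '/') of the suffix,
-- "pe == -1" is '/' ∉ suffix, and advancing the cursor past that '/' is (dropWhile (· ≠ '/')).tail.
def pvBGo (ps ts : List Char) (d : PySem.Dict String String) : Option (PySem.Dict String String) :=
  let pseg := ps.takeWhile (· ≠ '/')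
  let tseg := ts.takeWhile (· ≠ '/')
  let step : Option (PySem.Dict String String) :=
    if PySem.Chars.startswith tseg ['<'] then
      some (d.insert (String.ofList (PySem.List.slice tseg (some 1) (some (-1)))) (String.ofList pseg))
    else if tseg ≠ pseg then none
    else some d
  match step with
  | none => none
  | some d' =>
    if hp : '/' ∈ ps then
      if '/' ∈ ts then pvBGo ((ps.dropWhile (· ≠ '/')).tail) ((ts.dropWhile (· ≠ '/')).tail) d'
      else none
    else if '/' ∈ ts then none
    else some d'
termination_by ps.length
decreasing_by
  have hne : ps.dropWhile (fun c => decide (c ≠ '/')) ≠ [] := by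
    intro hn
    rw [List.dropWhile_eq_nil_iff] at hn
    simpa using hn '/' hp
  have hle := List.length_dropWhile_le (fun c => decide (c ≠ '/')) ps
  have hpos := List.length_pos_of_ne_nil hne
  simp only [List.length_tail]
  omega

def parse_path_variables_py_alt (pathname : String) (path_template : String) : Option (List (String × String)) :=
  (pvBGo pathname.toList path_template.toList PySem.Dict.empty).map (·.items)

-- ===== PRECONDITION & SPEC =====
def Spec_parse_path_variables_py (pathname : String) (path_template : String) (out : Option (List (String × String))) : Prop := out = parse_path_variables_py_alt pathname path_template
instance (pathname : String) (path_template : String) (out : Option (List (String × String))) : Decidable (Spec_parse_path_variables_py pathname path_template out) := by unfold Spec_parse_path_variables_py; infer_instance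

-- ===== CLAIM (what is proved, stated in full; the proofs are below) =====
def Claim_equal_parse_path_variables_py : Prop := ∀ (pathname : String) (path_template : String), Dom_parse_path_variables_py pathname path_template → Spec_parse_path_variables_py pathname path_template (parse_path_variables_py pathname path_template)

-- ===== LEMMAS AND PROOFS =====

-- the list of '/'-separated segments of a char list, in B's span-based recursion shape
def pvSegs (cs : List Char) : List (List Char) :=
  if hp : '/' ∈ cs then
    cs.takeWhile (· ≠ '/') :: pvSegs ((cs.dropWhile (· ≠ '/')).tail)
  else [cs]
termination_by cs.length
decreasing_by
  have hne : cs.dropWhile (fun c => decide (c ≠ '/')) ≠ [] := by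
    intro hn
    rw [List.dropWhile_eq_nil_iff] at hn
    simpa using hn '/' hp
  have hle := List.length_dropWhile_le (fun c => decide (c ≠ '/')) cs
  have hpos := List.length_pos_of_ne_nil hne
  simp only [List.length_tail]
  omega

theorem pvSegs_ne_nil (cs : List Char) : pvSegs cs ≠ [] := by
  rw [pvSegs]; split <;> simp

theorem pvSegs_of_mem {cs : List Char} (h : '/' ∈ cs) :
    pvSegs cs = cs.takeWhile (· ≠ '/') :: pvSegs ((cs.dropWhile (· ≠ '/')).tail) := by
  rw [pvSegs]; simp [h]

theorem pvSegs_of_not_mem {cs : List Char} (h : '/' ∉ cs) : pvSegs cs = [cs] := by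
  rw [pvSegs]; simp [h]

theorem pvTakeWhile_of_not_mem {cs : List Char} (h : '/' ∉ cs) :
    cs.takeWhile (· ≠ '/') = cs := by
  apply List.takeWhile_eq_self_iff.mpr
  intro x hx
  simp only [decide_eq_true_eq]
  exact fun he => h (he ▸ hx)

theorem pvSegs_length_pos (cs : List Char) : 0 < (pvSegs cs).length :=
  List.length_pos_of_ne_nil (pvSegs_ne_nil cs)

-- PySem's fuel-based splitOn.go computes pvSegs for the single-char separator '/'
theorem pvSplitOnGo_eq (fuel : Nat) : ∀ (l cur : List Char) (acc : List (List Char)),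
    l.length < fuel →
    PySem.Chars.splitOn.go ['/'] fuel l cur acc
      = acc.reverse ++ (pvSegs l).modifyHead (fun s => cur.reverse ++ s) := by
  induction fuel with
  | zero => intro l cur acc h; omega
  | succ fuel ih =>
    intro l cur acc h
    match l with
    | [] =>
      rw [pvSegs]
      simp [PySem.Chars.splitOn.go]
    | c :: rest =>
      by_cases hc : c = '/'
      · subst hc
        have hpre : List.isPrefixOf ['/'] ('/' :: rest) = true := by simp [List.isPrefixOf]
        have hmem : '/' ∈ '/' :: rest := List.mem_cons_self
        rw [pvSegs]
        simp only [hmem, dite_true]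
        simp only [PySem.Chars.splitOn.go, hpre, if_true, List.length_singleton, List.drop_succ_cons, List.drop_zero]
        rw [ih rest [] (cur.reverse :: acc) (by simpa using h)]
        obtain ⟨s0, srest, hs⟩ : ∃ s0 srest, pvSegs rest = s0 :: srest := by
          cases hq : pvSegs rest with
          | nil => exact absurd hq (pvSegs_ne_nil rest)
          | cons a b => exact ⟨a, b, rfl⟩
        simp [hs, List.takeWhile, List.dropWhile]
      · have hpre : List.isPrefixOf ['/'] (c :: rest) = false := by
          simp [List.isPrefixOf]; exact fun hh => absurd hh.symm hc
        have htake : (c :: rest).takeWhile (· ≠ '/') = c :: rest.takeWhile (· ≠ '/') := by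
          simp [List.takeWhile, hc]
        have hdrop : (c :: rest).dropWhile (· ≠ '/') = rest.dropWhile (· ≠ '/') := by
          simp [List.dropWhile, hc]
        have hmem : ('/' ∈ c :: rest) = ('/' ∈ rest) := by
          simp only [eq_iff_iff, List.mem_cons, or_iff_right_iff_imp]
          intro hh; exact absurd hh.symm hc
        simp only [PySem.Chars.splitOn.go, hpre, Bool.false_eq_true, if_false]
        rw [ih rest (c :: cur) acc (by simpa using h)]
        by_cases hm : '/' ∈ rest
        · have hm2 : '/' ∈ c :: rest := by rw [hmem]; exact hm
          rw [pvSegs_of_mem (cs := c :: rest) hm2, htake, hdrop, pvSegs_of_mem (cs := rest) hm]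
          simp
        · have hm2 : '/' ∉ c :: rest := by rw [hmem]; exact hm
          rw [pvSegs_of_not_mem (cs := rest) hm, pvSegs_of_not_mem (cs := c :: rest) hm2]
          simp
theorem pvSplitOn_eq (cs : List Char) : PySem.Chars.splitOn cs ['/'] = pvSegs cs := by
  unfold PySem.Chars.splitOn
  rw [pvSplitOnGo_eq (cs.length + 1) cs [] [] (by omega)]
  obtain ⟨s0, srest, hs⟩ : ∃ s0 srest, pvSegs cs = s0 :: srest := by
    cases hq : pvSegs cs with
    | nil => exact absurd hq (pvSegs_ne_nil cs)
    | cons a b => exact ⟨a, b, rfl⟩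
  simp [hs]

-- A's zip loop on the string segments, restated on the char-list segments
def pvALoopC : List (List Char × List Char) → PySem.Dict String String → Option (PySem.Dict String String)
  | [], d => some d
  | (p, t) :: rest, d =>
    if PySem.Chars.startswith t ['<'] then
      pvALoopC rest (d.insert (String.ofList (PySem.List.slice t (some 1) (some (-1)))) (String.ofList p))
    else if t ≠ p then none
    else pvALoopC rest d

theorem pvALoop_map (l1 l2 : List (List Char)) (d : PySem.Dict String String) :
    pvALoop ((l1.map String.ofList).zip (l2.map String.ofList)) d = pvALoopC (l1.zip l2) d := by
  induction l1 generalizing l2 d with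
  | nil => simp [pvALoop, pvALoopC]
  | cons p p1 ih =>
    cases l2 with
    | nil => simp [pvALoop, pvALoopC]
    | cons t t1 =>
      simp only [List.map_cons, List.zip_cons_cons, pvALoop, pvALoopC]
      have h1 : PySem.Str.startswith (String.ofList t) "<" = PySem.Chars.startswith t ['<'] := by
        simp [pysem]
      have h2 : PySem.Str.slice (String.ofList t) (some 1) (some (-1))
          = String.ofList (PySem.List.slice t (some 1) (some (-1))) := by
        apply String.toList_inj.mp; simp [pysem]
      rw [h1, h2]
      split
      · exact ih t1 _
      · simp only [ne_eq, String.ofList_inj]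
        split
        · rfl
        · exact ih t1 d

-- B's streaming scan equals "length check, then A's zip loop" on the segment lists
theorem pvBGo_eq_aux (n : Nat) : ∀ (ps ts : List Char) (d : PySem.Dict String String),
    ps.length ≤ n →
    pvBGo ps ts d =
      if (pvSegs ps).length = (pvSegs ts).length
      then pvALoopC ((pvSegs ps).zip (pvSegs ts)) d
      else none := by
  induction n using Nat.strong_induction_on with
  | _ n ih =>
    intro ps ts d hn
    rw [pvBGo]
    by_cases hp : '/' ∈ ps <;> by_cases ht : '/' ∈ ts
    · -- both suffixes still contain '/': both sides step to the next segment
      have hne : ps.dropWhile (fun c => decide (c ≠ '/')) ≠ [] := by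
        intro hq; rw [List.dropWhile_eq_nil_iff] at hq; simpa using hq '/' hp
      have hlen : ((ps.dropWhile (· ≠ '/')).tail).length < ps.length := by
        have hle := List.length_dropWhile_le (fun c => decide (c ≠ '/')) ps
        have hpos := List.length_pos_of_ne_nil hne
        simp only [List.length_tail]; omega
      have hih := fun ts' d' => ih (n - 1) (by omega) ((ps.dropWhile (· ≠ '/')).tail) ts' d' (by omega)
      simp only [ne_eq, decide_not] at hih
      rw [pvSegs_of_mem hp, pvSegs_of_mem ht]
      simp only [List.length_cons, Nat.add_right_cancel_iff, List.zip_cons_cons, pvALoopC,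
        ne_eq, decide_not]
      split_ifs <;> first | rfl | simp [*]
    · -- pathname still has '/' but the template is on its last segment: counts differ, both none
      have h1 := pvSegs_length_pos ((ps.dropWhile (· ≠ '/')).tail)
      have hcond : ((pvSegs ps).length = (pvSegs ts).length) = False := by
        rw [pvSegs_of_mem hp, pvSegs_of_not_mem ht]
        simp [pvSegs_ne_nil]
      simp only [hcond, if_false]
      split <;> first | rfl | simp [hp, ht]
    · -- template still has '/' but the pathname is on its last segment: counts differ, both none
      have h1 := pvSegs_length_pos ((ts.dropWhile (· ≠ '/')).tail)
      have hcond : ((pvSegs ps).length = (pvSegs ts).length) = False := by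
        rw [pvSegs_of_not_mem hp, pvSegs_of_mem ht]
        simp [pvSegs_ne_nil]
      simp only [hcond, if_false]
      split <;> first | rfl | simp [hp, ht]
    · -- last segment on both sides
      rw [pvSegs_of_not_mem hp, pvSegs_of_not_mem ht]
      rw [pvTakeWhile_of_not_mem hp, pvTakeWhile_of_not_mem ht]
      simp only [List.length_singleton, List.zip_cons_cons, List.zip_nil_right, if_true, pvALoopC,
        ne_eq, decide_not]
      split_ifs <;> rfl

theorem pvBGo_eq (ps ts : List Char) (d : PySem.Dict String String) :
    pvBGo ps ts d =
      if (pvSegs ps).length = (pvSegs ts).length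
      then pvALoopC ((pvSegs ps).zip (pvSegs ts)) d
      else none :=
  pvBGo_eq_aux ps.length ps ts d le_rfl

-- ===== VERDICT (by name: the statement is the Claim_ definition above) =====
theorem pvSplit_eq (s : String) :
    (PySem.Str.split? s "/").getD [] = (pvSegs s.toList).map String.ofList := by
  have h : ("/" : String).toList = ['/'] := rfl
  simp [PySem.Str.split?, PySem.Chars.split?, h, pvSplitOn_eq]

theorem parse_path_variables_py_spec : Claim_equal_parse_path_variables_py := by
  intro pathname path_template _
  unfold Spec_parse_path_variables_py parse_path_variables_py parse_path_variables_py_alt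
  rw [pvSplit_eq, pvSplit_eq, pvBGo_eq]
  simp only [ne_eq, ite_not, List.length_map]
  rw [pvALoop_map]
  split <;> rfl
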